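-- pv_equiv track=rewrite | github.com/DungenRobot/advent-of-code-2025 | day10/part2.py | buttons_posible
-- ===== SOURCE A (Python) =====
-- t_button_groups = list[set[int]]
--
-- t_joltages = list[int]
--
-- def buttons_posible(buttons: t_button_groups, joltages: t_joltages):
--
--     for i, num in enumerate(joltages):
--
--         if num > 0:
--
--             group_has_i = False
--
--             for group in buttons:
--                 if i in group:
--                     group_has_i = True
--
--             if group_has_i == False:
--                 return False
--
--     return True
-- ===== SOURCE B (Python) =====
-- def buttons_posible(buttons, joltages):
--     required = {i for i, n in enumerate(joltages) if n > 0}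
--     for group in buttons:
--         required -= group
--         if not required:
--             break
--     return not required
-- ===== Notes on version B (the rewrite author's own statement) =====
-- stated objective: alternative
-- what changed: B reverses the loop nesting: instead of scanning all button groups for every positive joltage index, it builds the set of required indices once, then iterates over the button groups subtracting each group from the set with an early exit once it is empty, returning whether the set ended empty.
import Mathlib
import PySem

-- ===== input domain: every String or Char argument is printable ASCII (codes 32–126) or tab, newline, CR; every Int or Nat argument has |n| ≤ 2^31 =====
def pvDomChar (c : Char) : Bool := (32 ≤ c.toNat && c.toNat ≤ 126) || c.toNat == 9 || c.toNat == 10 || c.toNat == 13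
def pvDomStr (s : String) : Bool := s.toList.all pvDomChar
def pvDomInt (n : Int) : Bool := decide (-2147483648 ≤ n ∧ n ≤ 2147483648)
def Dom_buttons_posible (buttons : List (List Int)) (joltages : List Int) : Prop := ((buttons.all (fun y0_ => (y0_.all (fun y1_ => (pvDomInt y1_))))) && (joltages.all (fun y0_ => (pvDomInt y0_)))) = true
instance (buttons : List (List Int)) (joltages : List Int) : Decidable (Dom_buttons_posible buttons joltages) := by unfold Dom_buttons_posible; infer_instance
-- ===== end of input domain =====

-- B reverses A's loop nesting: it maintains a shrinking set of still-uncovered positive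
-- indices, subtracting each button group once, instead of scanning all groups per index.

-- ===== PORT A =====
-- the outer 'for i, num in enumerate(joltages)' loop, with early 'return False'
def pvAGo (buttons : List (List Int)) : List (Int × Int) → Bool
  | [] => true
  | (i, num) :: rest =>
    if num > 0 then
      -- inner 'for group in buttons' loop updating group_has_i (no break)
      let group_has_i := buttons.foldl (fun f g => if decide (i ∈ g) then true else f) false
      if group_has_i = false then false else pvAGo buttons rest
    else pvAGo buttons rest

def buttons_posible (buttons : List (List Int)) (joltages : List Int) : Bool :=
  pvAGo buttons (PySem.List.enumerate joltages)

-- ===== PORT B =====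
-- 'for group in buttons: required -= group; if not required: break'
def pvBGo : List (List Int) → PySem.Set Int → PySem.Set Int
  | [], req => req
  | g :: rest, req =>
    let req' := PySem.Set.diff req g
    if req'.isEmpty then req' else pvBGo rest req'

def buttons_posible_alt (buttons : List (List Int)) (joltages : List Int) : Bool :=
  -- required = {i for i, n in enumerate(joltages) if n > 0}
  let required : PySem.Set Int :=
    PySem.Set.ofList (((PySem.List.enumerate joltages).filter (fun p => decide (p.2 > 0))).map (·.1))
  (pvBGo buttons required).isEmpty

-- ===== PRECONDITION & SPEC =====
def Spec_buttons_posible (buttons : List (List Int)) (joltages : List Int) (out : Bool) : Prop := out = buttons_posible_alt buttons joltages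
instance (buttons : List (List Int)) (joltages : List Int) (out : Bool) : Decidable (Spec_buttons_posible buttons joltages out) := by unfold Spec_buttons_posible; infer_instance

-- ===== CLAIM (what is proved, stated in full; the proofs are below) =====
def Claim_equal_buttons_posible : Prop := ∀ (buttons : List (List Int)) (joltages : List Int), Dom_buttons_posible buttons joltages → Spec_buttons_posible buttons joltages (buttons_posible buttons joltages)

-- ===== LEMMAS AND PROOFS =====

-- the inner flag loop of A is an 'any'
theorem pvFlag_eq_any (i : Int) (gs : List (List Int)) (b : Bool) :
    gs.foldl (fun f g => if decide (i ∈ g) then true else f) b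
      = (b || gs.any (fun g => decide (i ∈ g))) := by
  induction gs generalizing b with
  | nil => simp
  | cons g rest ih =>
    simp only [List.foldl, List.any_cons]
    rw [ih]
    by_cases h : i ∈ g <;> simp [h]

-- A's outer loop is an 'all' over the enumerated pairs
theorem pvAGo_eq_all (buttons : List (List Int)) (ps : List (Int × Int)) :
    pvAGo buttons ps
      = ps.all (fun p => !(decide (p.2 > 0)) || buttons.any (fun g => decide (p.1 ∈ g))) := by
  induction ps with
  | nil => rfl
  | cons p rest ih =>
    obtain ⟨i, num⟩ := p
    simp only [pvAGo, pvFlag_eq_any, Bool.false_or, List.all_cons, ih]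
    by_cases h : num > 0 <;> by_cases hc : buttons.any (fun g => decide (i ∈ g)) = true <;>
      simp [h, hc]

-- all over a disjunction = all of the filtered remainder
theorem pvAll_filter (xs : List Int) (p q : Int → Bool) :
    (xs.filter (fun x => !p x)).all q = xs.all (fun x => p x || q x) := by
  induction xs with
  | nil => rfl
  | cons x rest ih =>
    by_cases h : p x = true <;> simp [h, ih]

-- B's loop: the final set is empty iff every required index lies in some group
theorem pvBGo_isEmpty (gs : List (List Int)) (req : PySem.Set Int) :
    (pvBGo gs req).isEmpty = req.all (fun i => gs.any (fun g => decide (i ∈ g))) := by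
  induction gs generalizing req with
  | nil => cases req <;> simp [pvBGo]
  | cons g rest ih =>
    simp only [pvBGo]
    by_cases h : (PySem.Set.diff req g).isEmpty = true
    · rw [if_pos h]
      rw [h]
      rw [List.isEmpty_iff] at h
      symm
      simp only [List.all_eq_true, List.any_cons]
      intro i hi
      have : i ∈ g := by
        by_contra hg
        have : i ∈ PySem.Set.diff req g := (PySem.Set.mem_diff req g i).mpr ⟨hi, hg⟩
        simp [h] at this
      simp [this]
    · rw [if_neg h, ih]
      have hdiff : PySem.Set.diff req g = req.filter (fun i => !(decide (i ∈ g))) := by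
        apply List.filter_congr
        intro x _
        simp [PySem.Set.contains]
      rw [hdiff, pvAll_filter]
      simp only [List.any_cons]

theorem buttons_posible_spec : Claim_equal_buttons_posible := by
  intro buttons joltages _
  unfold Spec_buttons_posible buttons_posible buttons_posible_alt
  rw [pvAGo_eq_all, pvBGo_isEmpty, Bool.eq_iff_iff]
  simp only [List.all_eq_true, PySem.Set.mem_ofList, List.mem_map, List.mem_filter,
    Bool.or_eq_true, Bool.not_eq_eq_eq_not, Bool.not_true, decide_eq_false_iff_not, not_lt,
    decide_eq_true_eq, forall_exists_index, and_imp]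
  constructor
  · rintro h i p hp hpos rfl
    rcases h p hp with h1 | h1
    · omega
    · exact h1
  · intro h p hp
    by_cases hpos : p.2 > 0
    · exact Or.inr (h p.1 p hp (by simpa using hpos) rfl)
    · exact Or.inl (by omega)
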